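-- pv_equiv track=rewrite | github.com/GaneshNeupane01/Django_Insurance_Tracker | vehicles/utils.py | correct_plate
-- ===== SOURCE A (Python) =====
-- CONFUSION_MAP = {
--     '0': ['O', 'Q', 'D'],
--     '1': ['I', 'L', '|'],
--     '2': ['Z'],
--     '5': ['S'],
--     '6': ['G', 'C'],
--     '8': ['B'],
--     '9': ['g'],
--
--     'O': ['0'],
--     'I': ['1', 'l'],
--     'S': ['5'],
--     'B': ['8'],
--     'G': ['6'],
--     'Z': ['2'],
--     'D': ['0'],
--     'Q': ['0']
-- }
--
-- def correct_plate(text: str):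
--     """
--     Corrects AAA#### pattern using confusion map.
--     Returns: (plate_str_or_None, success_bool)
--     """
--
--
--     text = text[:7]
--     corrected = list(text)
--
--     # First 3 = letters
--     for i in range(3):
--         c = corrected[i]
--         if c.isdigit():
--             for letter, confused_with in CONFUSION_MAP.items():
--                 if letter.isalpha() and c in confused_with:
--                     corrected[i] = letter
--                     break
--
--     # Last 4 = digits
--     for i in range(3, 7):
--         c = corrected[i]
--         if c.isalpha():
--             for number, confused_with in CONFUSION_MAP.items():
--                 if number.isdigit() and c in confused_with:
--                     corrected[i] = number
--                     break
--
--     final = "".join(corrected)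
--
--
--
--     return final, True
-- ===== SOURCE B (Python) =====
-- CONFUSION_MAP = {
--     '0': ['O', 'Q', 'D'],
--     '1': ['I', 'L', '|'],
--     '2': ['Z'],
--     '5': ['S'],
--     '6': ['G', 'C'],
--     '8': ['B'],
--     '9': ['g'],
--
--     'O': ['0'],
--     'I': ['1', 'l'],
--     'S': ['5'],
--     'B': ['8'],
--     'G': ['6'],
--     'Z': ['2'],
--     'D': ['0'],
--     'Q': ['0']
-- }
--
-- # Reverse lookup tables, built once: first key (in map order) whose list contains the char.
-- _LETTER_FIX = {}
-- _DIGIT_FIX = {}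
-- for _key, _vals in CONFUSION_MAP.items():
--     for _v in _vals:
--         if _key.isalpha():
--             _LETTER_FIX.setdefault(_v, _key)
--         if _key.isdigit():
--             _DIGIT_FIX.setdefault(_v, _key)
--
--
-- def _fix(i, c):
--     if i < 3 and c.isdigit():
--         return _LETTER_FIX.get(c, c)
--     if i >= 3 and c.isalpha():
--         return _DIGIT_FIX.get(c, c)
--     return c
--
--
-- def correct_plate(text: str):
--     cs = list(text[:7])
--     return "".join(_fix(i, cs[i]) for i in range(7)), True
-- ===== Notes on version B (the rewrite author's own statement) =====
-- stated objective: alternative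
-- what changed: Replaces A's two in-place index loops that each rescan CONFUSION_MAP per character with two reverse-lookup dicts precomputed once from the map and a single comprehension over the 7 positions of text[:7].
import Mathlib
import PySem

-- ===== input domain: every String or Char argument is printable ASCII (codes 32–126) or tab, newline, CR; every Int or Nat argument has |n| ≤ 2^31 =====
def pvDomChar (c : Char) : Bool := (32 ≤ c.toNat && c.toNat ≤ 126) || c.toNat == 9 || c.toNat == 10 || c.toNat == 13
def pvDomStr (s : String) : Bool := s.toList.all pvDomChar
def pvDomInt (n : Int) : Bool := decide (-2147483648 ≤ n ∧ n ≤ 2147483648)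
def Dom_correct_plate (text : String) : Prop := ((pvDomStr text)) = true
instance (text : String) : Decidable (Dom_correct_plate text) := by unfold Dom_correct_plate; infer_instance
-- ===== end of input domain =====

-- B replaces A's two in-place index loops with per-position scans of CONFUSION_MAP by one comprehension
-- over the 7 positions using two reverse-lookup dicts precomputed once from CONFUSION_MAP (alternative decomposition).

-- ===== PORT A =====
def confusionMap : List (Char × List Char) :=
  [('0', ['O','Q','D']), ('1', ['I','L','|']), ('2', ['Z']), ('5', ['S']),
   ('6', ['G','C']), ('8', ['B']), ('9', ['g']),
   ('O', ['0']), ('I', ['1','l']), ('S', ['5']), ('B', ['8']),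
   ('G', ['6']), ('Z', ['2']), ('D', ['0']), ('Q', ['0'])]

-- inner 'for letter, confused_with in CONFUSION_MAP.items(): if letter.isalpha() and c in confused_with: … break'
def findLetter (c : Char) : Option Char :=
  (confusionMap.find? (fun p => PySem.Chars.isalpha p.1 && p.2.contains c)).map (·.1)

def findNumber (c : Char) : Option Char :=
  (confusionMap.find? (fun p => PySem.Chars.isdigit p.1 && p.2.contains c)).map (·.1)

-- one iteration of 'for i in range(3)'; corrected[i] read/write is exact under Pre_ (index in range)
def stepLetter (st : List Char) (i : Int) : List Char :=
  let c := PySem.List.pyGetD st i ' '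
  if PySem.Chars.isdigit c then
    match findLetter c with
    | some k => PySem.List.pySetD st i k
    | none => st
  else st

def stepNumber (st : List Char) (i : Int) : List Char :=
  let c := PySem.List.pyGetD st i ' '
  if PySem.Chars.isalpha c then
    match findNumber c with
    | some k => PySem.List.pySetD st i k
    | none => st
  else st

def correct_plate (text : String) : String × Bool :=
  let corrected := PySem.List.slice text.toList none (some 7)
  let corrected := (PySem.List.pyRange 0 3 1).foldl stepLetter corrected
  let corrected := (PySem.List.pyRange 3 7 1).foldl stepNumber corrected
  (String.ofList (PySem.Chars.join [] (corrected.map ([·]))), true)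

-- ===== PORT B =====
-- module-level builder of (_LETTER_FIX, _DIGIT_FIX)
def fixTables : PySem.Dict Char Char × PySem.Dict Char Char :=
  confusionMap.foldl (fun t p =>
    p.2.foldl (fun t v =>
      let t1 := if PySem.Chars.isalpha p.1 then (t.1.setdefault v p.1, t.2) else t
      if PySem.Chars.isdigit p.1 then (t1.1, t1.2.setdefault v p.1) else t1) t)
    (PySem.Dict.empty, PySem.Dict.empty)

def fixChar (i : Int) (c : Char) : Char :=
  if i < 3 ∧ PySem.Chars.isdigit c = true then fixTables.1.getD c c
  else if 3 ≤ i ∧ PySem.Chars.isalpha c = true then fixTables.2.getD c c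
  else c

def correct_plate_alt (text : String) : String × Bool :=
  let cs := PySem.List.slice text.toList none (some 7)
  (String.ofList (PySem.Chars.join []
      ((PySem.List.pyRange 0 7 1).map (fun i => [fixChar i (PySem.List.pyGetD cs i ' ')]))), true)

-- ===== PRECONDITION & SPEC =====
-- A raises IndexError (corrected[i] past the end) whenever len(text) < 7; those inputs are excluded (B's cs[i] raises there too).
def Pre_correct_plate (text : String) : Prop := 7 ≤ PySem.Str.len text
instance (text : String) : Decidable (Pre_correct_plate text) := by unfold Pre_correct_plate; infer_instance
def pvWitness_correct_plate : String := "ABC1234"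

def Spec_correct_plate (text : String) (out : String × Bool) : Prop := out = correct_plate_alt text
instance (text : String) (out : String × Bool) : Decidable (Spec_correct_plate text out) := by unfold Spec_correct_plate; infer_instance

-- ===== CLAIM (what is proved, stated in full; the proofs are below) =====
def Claim_equal_correct_plate : Prop := ∀ (text : String), Dom_correct_plate text → Pre_correct_plate text → Spec_correct_plate text (correct_plate text)

-- ===== LEMMAS AND PROOFS =====

-- A's per-character actions, as pure functions
def fA (c : Char) : Char :=
  if PySem.Chars.isdigit c then (match findLetter c with | some k => k | none => c) else c
def fD (c : Char) : Char :=
  if PySem.Chars.isalpha c then (match findNumber c with | some k => k | none => c) else c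

lemma stepLetter_at (pre post : List Char) (c : Char) (i : Int) (h : i = pre.length) :
    stepLetter (pre ++ c :: post) i = pre ++ fA c :: post := by
  subst h
  have hget : PySem.List.pyGetD (pre ++ c :: post) (pre.length : Int) ' ' = c := by
    simp [PySem.List.pyGetD_natCast]
  unfold stepLetter fA
  rw [hget]
  by_cases hd : PySem.Chars.isdigit c = true
  · cases hf : findLetter c <;> simp [hd, hf, PySem.List.pySetD_natCast]
  · simp [hd]

lemma stepNumber_at (pre post : List Char) (c : Char) (i : Int) (h : i = pre.length) :
    stepNumber (pre ++ c :: post) i = pre ++ fD c :: post := by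
  subst h
  have hget : PySem.List.pyGetD (pre ++ c :: post) (pre.length : Int) ' ' = c := by
    simp [PySem.List.pyGetD_natCast]
  unfold stepNumber fD
  rw [hget]
  by_cases hd : PySem.Chars.isalpha c = true
  · cases hf : findNumber c <;> simp [hd, hf, PySem.List.pySetD_natCast]
  · simp [hd]

lemma fA_eq (c : Char) : fA c = (if PySem.Chars.isdigit c = true then fixTables.1.getD c c else c) := by
  have hfix : fixTables.1 = PySem.Dict.mk [('0','O'), ('1','I'), ('l','I'), ('5','S'), ('8','B'), ('6','G'), ('2','Z')] := by decide
  by_cases h : c ∈ ['0','1','l','5','8','6','2']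
  · fin_cases h <;> decide
  · simp only [List.mem_cons, List.not_mem_nil, or_false, not_or] at h
    obtain ⟨h0,h1,hl,h5,h8,h6,h2⟩ := h
    have ka0 : PySem.Chars.isalpha '0' = false := by decide
    have ka1 : PySem.Chars.isalpha '1' = false := by decide
    have ka2 : PySem.Chars.isalpha '2' = false := by decide
    have ka3 : PySem.Chars.isalpha '5' = false := by decide
    have ka4 : PySem.Chars.isalpha '6' = false := by decide
    have ka5 : PySem.Chars.isalpha '8' = false := by decide
    have ka6 : PySem.Chars.isalpha '9' = false := by decide
    have ka7 : PySem.Chars.isalpha 'O' = true := by decide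
    have ka8 : PySem.Chars.isalpha 'I' = true := by decide
    have ka9 : PySem.Chars.isalpha 'S' = true := by decide
    have ka10 : PySem.Chars.isalpha 'B' = true := by decide
    have ka11 : PySem.Chars.isalpha 'G' = true := by decide
    have ka12 : PySem.Chars.isalpha 'Z' = true := by decide
    have ka13 : PySem.Chars.isalpha 'D' = true := by decide
    have ka14 : PySem.Chars.isalpha 'Q' = true := by decide
    have ba0 : ('0' == c) = false := beq_eq_false_iff_ne.mpr (Ne.symm h0)
    have ba1 : ('1' == c) = false := beq_eq_false_iff_ne.mpr (Ne.symm h1)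
    have bal : ('l' == c) = false := beq_eq_false_iff_ne.mpr (Ne.symm hl)
    have ba5 : ('5' == c) = false := beq_eq_false_iff_ne.mpr (Ne.symm h5)
    have ba8 : ('8' == c) = false := beq_eq_false_iff_ne.mpr (Ne.symm h8)
    have ba6 : ('6' == c) = false := beq_eq_false_iff_ne.mpr (Ne.symm h6)
    have ba2 : ('2' == c) = false := beq_eq_false_iff_ne.mpr (Ne.symm h2)
    simp [fA, findLetter, confusionMap, hfix, PySem.Dict.getD, PySem.Dict.get?, List.find?, ka0, ka1, ka2, ka3, ka4, ka5, ka6, ka7, ka8, ka9, ka10, ka11, ka12, ka13, ka14,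
      h0, h1, hl, h5, h8, h6, h2, ba0, ba1, bal, ba5, ba8, ba6, ba2]

lemma fD_eq (c : Char) : fD c = (if PySem.Chars.isalpha c = true then fixTables.2.getD c c else c) := by
  have hfix : fixTables.2 = PySem.Dict.mk [('O','0'), ('Q','0'), ('D','0'), ('I','1'), ('L','1'), ('|','1'), ('Z','2'), ('S','5'), ('G','6'), ('C','6'), ('B','8'), ('g','9')] := by decide
  by_cases h : c ∈ ['O','Q','D','I','L','|','Z','S','G','C','B','g']
  · fin_cases h <;> decide
  · simp only [List.mem_cons, List.not_mem_nil, or_false, not_or] at h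
    obtain ⟨hO,hQ,hD,hI,hL,hb,hZ,hS,hG,hC,hB,hg⟩ := h
    have kd0 : PySem.Chars.isdigit '0' = true := by decide
    have kd1 : PySem.Chars.isdigit '1' = true := by decide
    have kd2 : PySem.Chars.isdigit '2' = true := by decide
    have kd3 : PySem.Chars.isdigit '5' = true := by decide
    have kd4 : PySem.Chars.isdigit '6' = true := by decide
    have kd5 : PySem.Chars.isdigit '8' = true := by decide
    have kd6 : PySem.Chars.isdigit '9' = true := by decide
    have kd7 : PySem.Chars.isdigit 'O' = false := by decide
    have kd8 : PySem.Chars.isdigit 'I' = false := by decide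
    have kd9 : PySem.Chars.isdigit 'S' = false := by decide
    have kd10 : PySem.Chars.isdigit 'B' = false := by decide
    have kd11 : PySem.Chars.isdigit 'G' = false := by decide
    have kd12 : PySem.Chars.isdigit 'Z' = false := by decide
    have kd13 : PySem.Chars.isdigit 'D' = false := by decide
    have kd14 : PySem.Chars.isdigit 'Q' = false := by decide
    have bdO : ('O' == c) = false := beq_eq_false_iff_ne.mpr (Ne.symm hO)
    have bdQ : ('Q' == c) = false := beq_eq_false_iff_ne.mpr (Ne.symm hQ)
    have bdD : ('D' == c) = false := beq_eq_false_iff_ne.mpr (Ne.symm hD)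
    have bdI : ('I' == c) = false := beq_eq_false_iff_ne.mpr (Ne.symm hI)
    have bdL : ('L' == c) = false := beq_eq_false_iff_ne.mpr (Ne.symm hL)
    have bdb : ('|' == c) = false := beq_eq_false_iff_ne.mpr (Ne.symm hb)
    have bdZ : ('Z' == c) = false := beq_eq_false_iff_ne.mpr (Ne.symm hZ)
    have bdS : ('S' == c) = false := beq_eq_false_iff_ne.mpr (Ne.symm hS)
    have bdG : ('G' == c) = false := beq_eq_false_iff_ne.mpr (Ne.symm hG)
    have bdC : ('C' == c) = false := beq_eq_false_iff_ne.mpr (Ne.symm hC)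
    have bdB : ('B' == c) = false := beq_eq_false_iff_ne.mpr (Ne.symm hB)
    have bdg : ('g' == c) = false := beq_eq_false_iff_ne.mpr (Ne.symm hg)
    simp [fD, findNumber, confusionMap, hfix, PySem.Dict.getD, PySem.Dict.get?, List.find?, kd0, kd1, kd2, kd3, kd4, kd5, kd6, kd7, kd8, kd9, kd10, kd11, kd12, kd13, kd14,
      hO, hQ, hD, hI, hL, hb, hZ, hS, hG, hC, hB, hg,
      bdO, bdQ, bdD, bdI, bdL, bdb, bdZ, bdS, bdG, bdC, bdB, bdg]

-- ===== VERDICT (by name: the statement is the Claim_ definition above) =====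
theorem correct_plate_spec : Claim_equal_correct_plate := by
  intro text _ hpre
  unfold Pre_correct_plate at hpre
  rw [PySem.Str.len_eq] at hpre
  show correct_plate text = correct_plate_alt text
  unfold correct_plate correct_plate_alt
  have h7 : 7 ≤ text.toList.length := by exact_mod_cast hpre
  rcases hL : text.toList with _ | ⟨a, _ | ⟨b, _ | ⟨c, _ | ⟨d, _ | ⟨e, _ | ⟨f, _ | ⟨g, rest⟩⟩⟩⟩⟩⟩⟩ <;>
    rw [hL] at h7 <;> simp at h7
  have hs : PySem.List.slice (a::b::c::d::e::f::g::rest) none (some 7) = [a,b,c,d,e,f,g] := by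
    rw [show (7:Int) = ((7:Nat):Int) from rfl, PySem.List.slice_to_natCast]
    rfl
  rw [hs]
  have hrange1 : PySem.List.pyRange 0 3 1 = [0,1,2] := by decide
  have hrange2 : PySem.List.pyRange 3 7 1 = [3,4,5,6] := by decide
  have hrange3 : PySem.List.pyRange 0 7 1 = [0,1,2,3,4,5,6] := by decide
  rw [hrange1, hrange2, hrange3]
  simp only [List.foldl]
  rw [show ([a,b,c,d,e,f,g] : List Char) = [] ++ a :: [b,c,d,e,f,g] from rfl,
      stepLetter_at _ _ _ _ (by simp)]
  rw [show ([] : List Char) ++ fA a :: [b,c,d,e,f,g] = [fA a] ++ b :: [c,d,e,f,g] from rfl,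
      stepLetter_at _ _ _ _ (by simp)]
  rw [show ([fA a] : List Char) ++ fA b :: [c,d,e,f,g] = [fA a, fA b] ++ c :: [d,e,f,g] from rfl,
      stepLetter_at _ _ _ _ (by simp)]
  rw [show ([fA a, fA b] : List Char) ++ fA c :: [d,e,f,g] = [fA a, fA b, fA c] ++ d :: [e,f,g] from rfl,
      stepNumber_at _ _ _ _ (by simp)]
  rw [show ([fA a, fA b, fA c] : List Char) ++ fD d :: [e,f,g] = [fA a, fA b, fA c, fD d] ++ e :: [f,g] from rfl,
      stepNumber_at _ _ _ _ (by simp)]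
  rw [show ([fA a, fA b, fA c, fD d] : List Char) ++ fD e :: [f,g] = [fA a, fA b, fA c, fD d, fD e] ++ f :: [g] from rfl,
      stepNumber_at _ _ _ _ (by simp)]
  rw [show ([fA a, fA b, fA c, fD d, fD e] : List Char) ++ fD f :: [g] = [fA a, fA b, fA c, fD d, fD e, fD f] ++ g :: [] from rfl,
      stepNumber_at _ _ _ _ (by simp)]
  simp [PySem.Chars.join, fixChar, fA_eq, fD_eq, PySem.List.pyGetD, PySem.List.pyGet?, PySem.List.pyIdx?]
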